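-- pv_equiv track=rewrite | github.com/andrazjelenc/SAT-solver | main.py | construct_dict_of_vars
-- ===== SOURCE A (Python) =====
-- def construct_dict_of_vars(num_of_variables, clauses_dict):
--     result = dict()
--
--     for var in range(1, num_of_variables + 1):
--         lst = set()
--         lst_neg = set()
--         for i in clauses_dict:
--             if var in clauses_dict[i]:
--                 lst.add(i)
--             if -var in clauses_dict[i]:
--                 lst_neg.add(i)
--         result[var] = lst
--         result[-var] = lst_neg
--
--     return result
-- ===== SOURCE B (Python) =====
-- def construct_dict_of_vars(num_of_variables, clauses_dict):
--     result = {}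
--     for var in range(1, num_of_variables + 1):
--         result[var] = set()
--         result[-var] = set()
--     for i, clause in clauses_dict.items():
--         for lit in clause:
--             if lit in result:
--                 result[lit].add(i)
--     return result
-- ===== Notes on version B (the rewrite author's own statement) =====
-- stated objective: faster
-- what changed: Instead of scanning every clause once per variable (and per sign), B pre-initialises the 2*num_of_variables empty sets and makes a single pass over the clauses, appending each clause id to the set of every literal it contains; the Lean Pre_ only requires the association list to have distinct keys, which is automatic for a Python dict.
import Mathlib
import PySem

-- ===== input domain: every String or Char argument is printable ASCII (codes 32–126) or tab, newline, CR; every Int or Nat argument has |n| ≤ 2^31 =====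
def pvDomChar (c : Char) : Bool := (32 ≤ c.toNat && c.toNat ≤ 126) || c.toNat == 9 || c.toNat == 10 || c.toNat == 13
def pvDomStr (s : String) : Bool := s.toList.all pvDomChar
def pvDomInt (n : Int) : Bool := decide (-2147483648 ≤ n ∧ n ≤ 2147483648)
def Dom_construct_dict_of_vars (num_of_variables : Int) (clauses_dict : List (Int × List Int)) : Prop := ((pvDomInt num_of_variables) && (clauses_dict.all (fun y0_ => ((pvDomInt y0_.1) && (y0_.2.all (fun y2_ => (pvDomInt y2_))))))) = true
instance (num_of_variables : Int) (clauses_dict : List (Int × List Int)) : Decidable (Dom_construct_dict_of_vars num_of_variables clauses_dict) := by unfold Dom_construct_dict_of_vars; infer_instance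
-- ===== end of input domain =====

-- B replaces A's per-variable scan of all clauses by one pass over the clauses into pre-initialised empty sets (objective: faster).

-- ===== PORT A =====
def construct_dict_of_vars (num_of_variables : Int) (clauses_dict : List (Int × List Int)) : List (Int × List Int) :=
  let cd : PySem.Dict Int (List Int) := PySem.Dict.mk clauses_dict
  let result : PySem.Dict Int (List Int) :=
    (PySem.List.pyRange 1 (num_of_variables + 1) 1).foldl (fun result var =>
      -- inner 'for i in clauses_dict' loop carrying the pair of sets (lst, lst_neg);
      -- clauses_dict[i] cannot raise since i is drawn from the keys ('.getD []' is never the default)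
      let p := cd.keys.foldl (fun (p : List Int × List Int) i =>
        let v := (cd.get? i).getD []
        (if var ∈ v then PySem.Set.add p.1 i else p.1,
         if -var ∈ v then PySem.Set.add p.2 i else p.2)) ([], [])
      (result.insert var p.1).insert (-var) p.2) PySem.Dict.empty
  result.items

-- ===== PORT B =====
def construct_dict_of_vars_alt (num_of_variables : Int) (clauses_dict : List (Int × List Int)) : List (Int × List Int) :=
  let init : PySem.Dict Int (List Int) :=
    (PySem.List.pyRange 1 (num_of_variables + 1) 1).foldl (fun r var =>
      (r.insert var []).insert (-var) []) PySem.Dict.empty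
  let result : PySem.Dict Int (List Int) :=
    clauses_dict.foldl (fun r q =>
      q.2.foldl (fun r lit =>
        if r.contains lit then r.modify lit [] (fun s => PySem.Set.add s q.1) else r) r) init
  result.items

-- ===== PRECONDITION & SPEC =====
-- Pre_ only requires the keys of the clause association list to be distinct: a Python dict
-- cannot carry duplicate keys, so no Python-representable input is excluded. (On a raw
-- duplicate-key association list the two ports may differ, because A's port looks each key
-- up by first match while B's port walks the pairs themselves.)
def Pre_construct_dict_of_vars (num_of_variables : Int) (clauses_dict : List (Int × List Int)) : Prop :=
  (clauses_dict.map Prod.fst).Nodup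
instance (num_of_variables : Int) (clauses_dict : List (Int × List Int)) : Decidable (Pre_construct_dict_of_vars num_of_variables clauses_dict) := by unfold Pre_construct_dict_of_vars; infer_instance
def pvWitness_construct_dict_of_vars : Int × (List (Int × List Int)) := (2, [(1, [1, -2]), (2, [-1, 2]), (3, [2])])

def Spec_construct_dict_of_vars (num_of_variables : Int) (clauses_dict : List (Int × List Int)) (out : List (Int × List Int)) : Prop := out = construct_dict_of_vars_alt num_of_variables clauses_dict
instance (num_of_variables : Int) (clauses_dict : List (Int × List Int)) (out : List (Int × List Int)) : Decidable (Spec_construct_dict_of_vars num_of_variables clauses_dict out) := by unfold Spec_construct_dict_of_vars; infer_instance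

-- ===== CLAIM (what is proved, stated in full; the proofs are below) =====
def Claim_equal_construct_dict_of_vars : Prop := ∀ (num_of_variables : Int) (clauses_dict : List (Int × List Int)), Dom_construct_dict_of_vars num_of_variables clauses_dict → Pre_construct_dict_of_vars num_of_variables clauses_dict → Spec_construct_dict_of_vars num_of_variables clauses_dict (construct_dict_of_vars num_of_variables clauses_dict)

-- ===== LEMMAS AND PROOFS =====

-- clause ids whose clause contains the literal v, in clause order
def pvSel (v : Int) (cs : List (Int × List Int)) : List Int :=
  (cs.filter (fun q => decide (v ∈ q.2))).map Prod.fst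

theorem pvSet_add_of_not_mem (s : List Int) (i : Int) (h : i ∉ s) :
    PySem.Set.add s i = s ++ [i] := by
  simp [PySem.Set.add, PySem.Set.contains, h]

-- A's inner loop over the keys equals the same loop over the pairs (keys distinct)
theorem pvKeysFold (cs : List (Int × List Int)) (hnd : (cs.map Prod.fst).Nodup)
    (var : Int) (a : List Int × List Int) :
    (PySem.Dict.mk cs).keys.foldl (fun (p : List Int × List Int) i =>
        let v := ((PySem.Dict.mk cs).get? i).getD []
        (if var ∈ v then PySem.Set.add p.1 i else p.1,
         if -var ∈ v then PySem.Set.add p.2 i else p.2)) a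
    = cs.foldl (fun (p : List Int × List Int) q =>
        (if var ∈ q.2 then PySem.Set.add p.1 q.1 else p.1,
         if -var ∈ q.2 then PySem.Set.add p.2 q.1 else p.2)) a := by
  have hkeys : (PySem.Dict.mk cs).keys = cs.map Prod.fst := rfl
  rw [hkeys, List.foldl_map]
  refine PySem.List.foldl_congr_mem _ _ _ _ ?_
  intro acc q hq
  have hget : (PySem.Dict.mk cs).get? q.1 = some q.2 :=
    PySem.Dict.get?_of_mem_items _ (by simpa using hq) hnd
  simp [hget]

-- the pair fold accumulates exactly the selected clause ids
theorem pvPairFold (var : Int) (cs : List (Int × List Int)) (hnd : (cs.map Prod.fst).Nodup)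
    (s1 s2 : List Int) (h1 : ∀ q ∈ cs, q.1 ∉ s1) (h2 : ∀ q ∈ cs, q.1 ∉ s2) :
    cs.foldl (fun (p : List Int × List Int) q =>
        (if var ∈ q.2 then PySem.Set.add p.1 q.1 else p.1,
         if -var ∈ q.2 then PySem.Set.add p.2 q.1 else p.2)) (s1, s2)
    = (s1 ++ pvSel var cs, s2 ++ pvSel (-var) cs) := by
  induction cs generalizing s1 s2 with
  | nil => simp [pvSel]
  | cons q t ih =>
    simp only [List.map_cons, List.nodup_cons, List.mem_map] at hnd
    have hq1 : q.1 ∉ s1 := h1 q (List.mem_cons_self ..)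
    have hq2 : q.1 ∉ s2 := h2 q (List.mem_cons_self ..)
    have hfresh1 : ∀ r ∈ t, r.1 ∉ s1 ++ [q.1] := by
      intro r hr
      simp only [List.mem_append, List.mem_singleton, not_or]
      exact ⟨h1 r (List.mem_cons_of_mem _ hr), fun h => hnd.1 ⟨r, hr, h⟩⟩
    have hfresh2 : ∀ r ∈ t, r.1 ∉ s2 ++ [q.1] := by
      intro r hr
      simp only [List.mem_append, List.mem_singleton, not_or]
      exact ⟨h2 r (List.mem_cons_of_mem _ hr), fun h => hnd.1 ⟨r, hr, h⟩⟩
    have hfresh1' : ∀ r ∈ t, r.1 ∉ s1 := fun r hr => h1 r (List.mem_cons_of_mem _ hr)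
    have hfresh2' : ∀ r ∈ t, r.1 ∉ s2 := fun r hr => h2 r (List.mem_cons_of_mem _ hr)
    simp only [List.foldl_cons]
    by_cases hp : var ∈ q.2 <;> by_cases hn : -var ∈ q.2 <;>
      simp only [hp, hn, if_pos, if_neg, not_false_iff, pvSet_add_of_not_mem _ _ hq1,
        pvSet_add_of_not_mem _ _ hq2] <;>
      first
      | (rw [ih hnd.2 _ _ hfresh1 hfresh2]; simp [pvSel, hp, hn])
      | (rw [ih hnd.2 _ _ hfresh1 hfresh2']; simp [pvSel, hp, hn])
      | (rw [ih hnd.2 _ _ hfresh1' hfresh2]; simp [pvSel, hp, hn])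
      | (rw [ih hnd.2 _ _ hfresh1' hfresh2']; simp [pvSel, hp, hn])

-- B's loop over one clause, as a map over the dictionary's items
theorem pvClauseFold (i : Int) (lits : List Int) (d : PySem.Dict Int (List Int))
    (hk : d.keys.Nodup) :
    lits.foldl (fun r lit =>
        if r.contains lit then r.modify lit [] (fun s => PySem.Set.add s i) else r) d
    = PySem.Dict.mk (d.items.map (fun kv =>
        (kv.1, if kv.1 ∈ lits then PySem.Set.add kv.2 i else kv.2))) := by
  induction lits generalizing d with
  | nil =>
    simp only [List.foldl_nil, List.not_mem_nil, if_false]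
    refine (PySem.Dict.ext ?_).symm
    simp
  | cons lit lits ih =>
    simp only [List.foldl_cons]
    by_cases hc : d.contains lit = true
    · rw [if_pos hc]
      have hitems : (d.modify lit [] (fun s => PySem.Set.add s i)).items
          = d.items.map (fun kv => (kv.1, if kv.1 = lit then PySem.Set.add kv.2 i else kv.2)) := by
        rw [PySem.Dict.modify, PySem.Dict.items_insert_of_contains _ _ hc]
        refine List.map_congr_left ?_
        intro p hp
        by_cases hpl : p.1 = lit
        · have : d.getD lit [] = p.2 := by
            rw [← hpl]; exact PySem.Dict.getD_of_mem_items d (by simpa using hp) hk []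
          simp [hpl, this]
        · simp [hpl]
      have hkeys : (d.modify lit [] (fun s => PySem.Set.add s i)).keys = d.keys := by
        simp only [PySem.Dict.keys, hitems, List.map_map]
        rfl
      rw [ih _ (by rw [hkeys]; exact hk)]
      refine PySem.Dict.ext ?_
      show _ = d.items.map _
      rw [hitems, List.map_map]
      refine List.map_congr_left ?_
      intro p hp
      by_cases hpl : p.1 = lit <;> by_cases hm : p.1 ∈ lits <;>
        simp [Function.comp, hpl, hm]
    · rw [if_neg hc]
      rw [ih _ hk]
      have hnk : lit ∉ d.keys := by
        intro h
        exact hc ((PySem.Dict.contains_iff_mem_keys d lit).mpr h)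
      refine PySem.Dict.ext ?_
      show d.items.map _ = d.items.map _
      refine List.map_congr_left ?_
      intro p hp
      have hpl : p.1 ≠ lit := by
        intro h
        exact hnk (h ▸ List.mem_map_of_mem hp)
      simp [hpl]

-- B's loop over all clauses, as a map over the dictionary's items
theorem pvClausesFold (cs : List (Int × List Int)) (hnd : (cs.map Prod.fst).Nodup)
    (d : PySem.Dict Int (List Int)) (hk : d.keys.Nodup)
    (hfresh : ∀ q ∈ cs, ∀ kv ∈ d.items, q.1 ∉ kv.2) :
    cs.foldl (fun r q =>
        q.2.foldl (fun r lit =>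
          if r.contains lit then r.modify lit [] (fun s => PySem.Set.add s q.1) else r) r) d
    = PySem.Dict.mk (d.items.map (fun kv => (kv.1, kv.2 ++ pvSel kv.1 cs))) := by
  induction cs generalizing d with
  | nil =>
    simp only [List.foldl_nil]
    refine (PySem.Dict.ext ?_).symm
    simp [pvSel]
  | cons q t ih =>
    simp only [List.map_cons, List.nodup_cons, List.mem_map] at hnd
    simp only [List.foldl_cons]
    rw [pvClauseFold q.1 q.2 d hk]
    have hitems : (d.items.map (fun kv =>
        (kv.1, if kv.1 ∈ q.2 then PySem.Set.add kv.2 q.1 else kv.2)))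
        = d.items.map (fun kv => (kv.1, kv.2 ++ if kv.1 ∈ q.2 then [q.1] else [])) := by
      refine List.map_congr_left ?_
      intro p hp
      by_cases hm : p.1 ∈ q.2
      · simp [hm, pvSet_add_of_not_mem _ _ (hfresh q (List.mem_cons_self ..) p hp)]
      · simp [hm]
    set d1 : PySem.Dict Int (List Int) := PySem.Dict.mk (d.items.map (fun kv =>
        (kv.1, if kv.1 ∈ q.2 then PySem.Set.add kv.2 q.1 else kv.2))) with hd1
    have hd1items : d1.items = d.items.map (fun kv => (kv.1, kv.2 ++ if kv.1 ∈ q.2 then [q.1] else [])) := hitems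
    have hd1keys : d1.keys = d.keys := by
      simp only [PySem.Dict.keys, hd1items, List.map_map]
      rfl
    rw [ih hnd.2 d1 (by rw [hd1keys]; exact hk) ?_]
    · refine PySem.Dict.ext ?_
      show _ = d.items.map _
      rw [hd1items, List.map_map]
      refine List.map_congr_left ?_
      intro p hp
      have : pvSel p.1 (q :: t) = (if p.1 ∈ q.2 then [q.1] else []) ++ pvSel p.1 t := by
        by_cases hm : p.1 ∈ q.2 <;> simp [pvSel, hm]
      simp [Function.comp, this]
    · intro r hr kv hkv
      rw [hd1items] at hkv
      obtain ⟨p, hp, rfl⟩ := List.mem_map.mp hkv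
      simp only [List.mem_append]
      rintro (h | h)
      · exact hfresh r (List.mem_cons_of_mem _ hr) p hp h
      · have : r.1 = q.1 := by
          by_cases hm : p.1 ∈ q.2
          · simp [hm] at h; exact h
          · simp [hm] at h
        exact hnd.1 ⟨r, hr, this⟩

-- the ±var insertion loop over a positive, duplicate-free range appends fresh pairs
theorem pvRangeFold (f g : Int → List Int) (R : List Int)
    (hpos : ∀ v ∈ R, 0 < v) (hnd : R.Nodup) (d : PySem.Dict Int (List Int))
    (hk : ∀ v ∈ R, v ∉ d.keys ∧ -v ∉ d.keys) :
    R.foldl (fun r var => (r.insert var (f var)).insert (-var) (g var)) d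
    = PySem.Dict.mk (d.items ++ R.flatMap (fun v => [(v, f v), (-v, g v)])) := by
  induction R generalizing d with
  | nil =>
    simp only [List.foldl_nil, List.flatMap_nil, List.append_nil]
  | cons v t ih =>
    simp only [List.nodup_cons] at hnd
    have hv : 0 < v := hpos v (List.mem_cons_self ..)
    have hkv := hk v (List.mem_cons_self ..)
    have hc1 : d.contains v = false := by
      rw [← Bool.not_eq_true, PySem.Dict.contains_iff_mem_keys]
      exact hkv.1
    have h1 : (d.insert v (f v)).items = d.items ++ [(v, f v)] :=
      PySem.Dict.items_insert_of_not_contains _ _ hc1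
    have hc2 : (d.insert v (f v)).contains (-v) = false := by
      rw [← Bool.not_eq_true, PySem.Dict.contains_iff_mem_keys,
        PySem.Dict.mem_keys_insert]
      rintro (h | h)
      · omega
      · exact hkv.2 h
    have h2 : ((d.insert v (f v)).insert (-v) (g v)).items
        = d.items ++ [(v, f v), (-v, g v)] := by
      rw [PySem.Dict.items_insert_of_not_contains _ _ hc2, h1, List.append_assoc]
      rfl
    have hkeys2 : ((d.insert v (f v)).insert (-v) (g v)).keys
        = d.keys ++ [v, -v] := by
      simp only [PySem.Dict.keys, h2, List.map_append]
      rfl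
    simp only [List.foldl_cons]
    rw [ih (fun w hw => hpos w (List.mem_cons_of_mem _ hw)) hnd.2 _ ?_]
    · refine PySem.Dict.ext ?_
      show _ = _
      rw [h2, List.flatMap_cons, ← List.append_assoc]
    · intro w hw
      have hwpos : 0 < w := hpos w (List.mem_cons_of_mem _ hw)
      have hwv : w ≠ v := fun h => hnd.1 (h ▸ hw)
      have hkw := hk w (List.mem_cons_of_mem _ hw)
      constructor <;> rw [hkeys2] <;> simp only [List.mem_append] <;> rintro (h | h)
      · exact hkw.1 h
      · simp only [List.mem_cons, List.not_mem_nil, or_false] at h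
        rcases h with h | h <;> omega
      · exact hkw.2 h
      · simp only [List.mem_cons, List.not_mem_nil, or_false] at h
        rcases h with h | h <;> omega

theorem pvFlatMapNodup (R : List Int) (hpos : ∀ v ∈ R, 0 < v) (hnd : R.Nodup) :
    (R.flatMap (fun v => [v, -v])).Nodup := by
  induction R with
  | nil => simp
  | cons v t ih =>
    simp only [List.nodup_cons] at hnd
    have hv : 0 < v := hpos v (List.mem_cons_self ..)
    simp only [List.flatMap_cons]
    refine List.Nodup.append ?_ (ih (fun w hw => hpos w (List.mem_cons_of_mem _ hw)) hnd.2) ?_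
    · simp only [List.nodup_cons, List.mem_singleton, List.not_mem_nil, not_false_iff,
        List.nodup_nil, and_true]
      omega
    · intro x hx hx2
      obtain ⟨w, hw, hxw⟩ := List.mem_flatMap.mp hx2
      have hwpos : 0 < w := hpos w (List.mem_cons_of_mem _ hw)
      have hwv : w ≠ v := fun h => hnd.1 (h ▸ hw)
      simp only [List.mem_cons, List.not_mem_nil, or_false] at hx hxw
      rcases hx with rfl | rfl <;> rcases hxw with h | h <;> omega

-- ===== VERDICT (by name: the statement is the Claim_ definition above) =====
theorem construct_dict_of_vars_spec : Claim_equal_construct_dict_of_vars := by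
  intro n cs _ hpre
  have hnd : (cs.map Prod.fst).Nodup := hpre
  unfold Spec_construct_dict_of_vars
  simp only [construct_dict_of_vars, construct_dict_of_vars_alt]
  have hRpos : ∀ v ∈ PySem.List.pyRange 1 (n + 1) 1, 0 < v := by
    intro v hv
    rw [PySem.List.mem_pyRange_one] at hv
    omega
  have hRnd : (PySem.List.pyRange 1 (n + 1) 1).Nodup := PySem.List.nodup_pyRange_one 1 (n + 1)
  -- A's side
  have hstep : ∀ (r : PySem.Dict Int (List Int)), ∀ var ∈ PySem.List.pyRange 1 (n + 1) 1,
      (fun (result : PySem.Dict Int (List Int)) (var : Int) =>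
        let p := (PySem.Dict.mk cs).keys.foldl (fun (p : List Int × List Int) i =>
          let v := ((PySem.Dict.mk cs).get? i).getD []
          (if var ∈ v then PySem.Set.add p.1 i else p.1,
           if -var ∈ v then PySem.Set.add p.2 i else p.2)) ([], [])
        (result.insert var p.1).insert (-var) p.2) r var
      = (r.insert var (pvSel var cs)).insert (-var) (pvSel (-var) cs) := by
    intro r var _
    show ((r.insert var _).insert (-var) _) = _
    rw [pvKeysFold cs hnd var ([], []),
      pvPairFold var cs hnd [] [] (by simp) (by simp)]
    simp
  have hA : ((PySem.List.pyRange 1 (n + 1) 1).foldl (fun (result : PySem.Dict Int (List Int)) var =>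
        let p := (PySem.Dict.mk cs).keys.foldl (fun (p : List Int × List Int) i =>
          let v := ((PySem.Dict.mk cs).get? i).getD []
          (if var ∈ v then PySem.Set.add p.1 i else p.1,
           if -var ∈ v then PySem.Set.add p.2 i else p.2)) ([], [])
        (result.insert var p.1).insert (-var) p.2) PySem.Dict.empty).items
      = (PySem.List.pyRange 1 (n + 1) 1).flatMap
          (fun v => [(v, pvSel v cs), (-v, pvSel (-v) cs)]) := by
    rw [PySem.List.foldl_congr_mem _ _
      (fun (r : PySem.Dict Int (List Int)) var =>
        (r.insert var (pvSel var cs)).insert (-var) (pvSel (-var) cs)) _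
      (fun acc x hx => hstep acc x hx)]
    rw [pvRangeFold _ _ _ hRpos hRnd PySem.Dict.empty (by intro v _; simp [PySem.Dict.keys, PySem.Dict.empty])]
    rfl
  -- B's side
  have hinit : (PySem.List.pyRange 1 (n + 1) 1).foldl
        (fun (r : PySem.Dict Int (List Int)) var => (r.insert var []).insert (-var) []) PySem.Dict.empty
      = PySem.Dict.mk ((PySem.List.pyRange 1 (n + 1) 1).flatMap (fun v => [(v, []), (-v, [])])) := by
    rw [pvRangeFold (fun _ => []) (fun _ => []) _ hRpos hRnd PySem.Dict.empty
      (by intro v _; simp [PySem.Dict.keys, PySem.Dict.empty])]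
    rfl
  have hB : (cs.foldl (fun (r : PySem.Dict Int (List Int)) q =>
        q.2.foldl (fun r lit =>
          if r.contains lit then r.modify lit [] (fun s => PySem.Set.add s q.1) else r) r)
        ((PySem.List.pyRange 1 (n + 1) 1).foldl
          (fun (r : PySem.Dict Int (List Int)) var => (r.insert var []).insert (-var) []) PySem.Dict.empty)).items
      = (PySem.List.pyRange 1 (n + 1) 1).flatMap
          (fun v => [(v, pvSel v cs), (-v, pvSel (-v) cs)]) := by
    rw [hinit]
    have hkeys : (PySem.Dict.mk ((PySem.List.pyRange 1 (n + 1) 1).flatMap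
        (fun v => [(v, ([] : List Int)), (-v, [])]))).keys
        = (PySem.List.pyRange 1 (n + 1) 1).flatMap (fun v => [v, -v]) := by
      simp [PySem.Dict.keys, List.map_flatMap]
    rw [pvClausesFold cs hnd _ (by rw [hkeys]; exact pvFlatMapNodup _ hRpos hRnd) ?_]
    · show (List.map _ (List.flatMap _ _)) = _
      rw [List.map_flatMap]
      simp
    · intro q _ kv hkv
      have : kv.2 = [] := by
        obtain ⟨v, _, hv⟩ := List.mem_flatMap.mp hkv
        simp only [List.mem_cons, List.not_mem_nil, or_false] at hv
        rcases hv with rfl | rfl <;> rfl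
      rw [this]
      exact List.not_mem_nil
  rw [hA, hB]
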